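-- pv_equiv track=rewrite | github.com/Hari-Govind-S/klaworkshop | Milestone5/milestone5.py | templateconst
-- ===== SOURCE A (Python) =====
-- def templateconst(template):
--     path=[]
--     for i in range(len(template[0])-1):
--         x1,y1 = template[0][i]
--         x2,y2 = template[0][i+1]
--         x = x2 - x1
--         y = y2 - y1
--         path.append((x,y))
--     temp=[]
--     for i in range(len(path)):
--         x=0
--         y=0
--         poly=[]
--         poly1=[]
--         poly2=[]
--         poly3=[]
--         polyy1=[]
--         polyy=[]
--         polyy2=[]
--         polyy3=[]
--         poly.append((x,y))
--         poly1.append((y,x))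
--         poly2.append((-x,y))
--         poly3.append((y,-x))
--         polyy.append((-x,-y))
--         polyy1.append((-y,-x))
--         polyy2.append((x,-y))
--         polyy3.append((-y,x))
--         for j in range(len(path)):
--             x0,y0=path[j]
--             x = x + x0
--             y = y + y0
--             poly.append((x,y))
--             poly1.append((y,x))
--             polyy.append((-x,-y))
--             polyy1.append((-y,-x))
--             poly2.append((-x,y))
--             poly3.append((y,-x))
--             polyy2.append((x,-y))
--             polyy3.append((-y,x))
--         temp.append(poly)
--         temp.append(poly1)
--         temp.append(poly2)
--         temp.append(poly3)
--         temp.append(polyy)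
--         temp.append(polyy1)
--         temp.append(polyy2)
--         temp.append(polyy3)
--         a = path[0]
--         path.remove(a)
--         path.append(a)
--     return temp
-- ===== SOURCE B (Python) =====
-- def templateconst(template):
--     pts = template[0]
--     base = [(b[0] - a[0], b[1] - a[1]) for a, b in zip(pts, pts[1:])]
--     n = len(base)
--     out = []
--     for i in range(n):
--         rot = base[i:] + base[:i]
--         # phase 1: build the cumulative polygon once
--         points = [(0, 0)]
--         x = y = 0
--         for dx, dy in rot:
--             x += dx
--             y += dy
--             points.append((x, y))
--         # phase 2: map the eight fixed transforms over it
--         for f in ((lambda x, y: (x, y)), (lambda x, y: (y, x)),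
--                   (lambda x, y: (-x, y)), (lambda x, y: (y, -x)),
--                   (lambda x, y: (-x, -y)), (lambda x, y: (-y, -x)),
--                   (lambda x, y: (x, -y)), (lambda x, y: (-y, x))):
--             out.append([f(px, py) for px, py in points])
--     return out
-- ===== Notes on version B (the rewrite author's own statement) =====
-- stated objective: alternative
-- what changed: B splits A's single fused loop (which threads x,y through eight growing lists at once, mutating and rotating the path in place) into two phases per rotation: build the base cumulative point list once, then map eight fixed coordinate transforms over it; differences come from zip(pts, pts[1:]) and the rotation from slicing instead of remove/append.
import Mathlib
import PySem

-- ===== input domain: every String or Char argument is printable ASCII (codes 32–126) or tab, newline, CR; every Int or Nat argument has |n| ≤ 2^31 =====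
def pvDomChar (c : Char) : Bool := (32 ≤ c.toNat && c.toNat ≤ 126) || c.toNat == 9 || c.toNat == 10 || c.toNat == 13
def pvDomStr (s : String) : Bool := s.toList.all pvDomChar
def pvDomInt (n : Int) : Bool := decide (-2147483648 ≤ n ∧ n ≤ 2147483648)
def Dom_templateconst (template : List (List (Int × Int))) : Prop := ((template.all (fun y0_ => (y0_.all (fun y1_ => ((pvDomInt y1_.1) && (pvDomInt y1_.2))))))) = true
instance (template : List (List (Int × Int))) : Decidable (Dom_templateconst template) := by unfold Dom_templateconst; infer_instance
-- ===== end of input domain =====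

-- B restructures A's single fused loop into two phases per rotation: build the base
-- cumulative polygon once, then map eight fixed coordinate transforms over it (objective:
-- alternative decomposition, same cost).

-- ===== PORT A =====
-- state of A's inner loop: (x, y, poly, poly1, poly2, poly3, polyy, polyy1, polyy2, polyy3)
def pvAState : Type :=
  Int × Int × List (Int × Int) × List (Int × Int) × List (Int × Int) × List (Int × Int) ×
  List (Int × Int) × List (Int × Int) × List (Int × Int) × List (Int × Int)

def pvAInner (s : pvAState) (d : Int × Int) : pvAState :=
  let (x, y, poly, poly1, poly2, poly3, polyy, polyy1, polyy2, polyy3) := s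
  let x := x + d.1
  let y := y + d.2
  (x, y, poly ++ [(x, y)], poly1 ++ [(y, x)], poly2 ++ [(-x, y)], poly3 ++ [(y, -x)],
   polyy ++ [(-x, -y)], polyy1 ++ [(-y, -x)], polyy2 ++ [(x, -y)], polyy3 ++ [(-y, x)])

def templateconst (template : List (List (Int × Int))) : List (List (Int × Int)) :=
  let t0 := (PySem.List.pyGet? template 0).getD []   -- template[0]; none (IndexError) excluded by Pre_
  let path := (List.range (t0.length - 1)).foldl (fun path i =>
    let p1 := t0.getD i (0, 0)      -- template[0][i], always in range here
    let p2 := t0.getD (i + 1) (0, 0)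
    path ++ [(p2.1 - p1.1, p2.2 - p1.2)]) []
  let st := (List.range path.length).foldl (fun (st : List (List (Int × Int)) × List (Int × Int)) _ =>
    let (temp, path) := st
    let x : Int := 0
    let y : Int := 0
    let s0 : pvAState :=
      (x, y, [(x, y)], [(y, x)], [(-x, y)], [(y, -x)], [(-x, -y)], [(-y, -x)], [(x, -y)], [(-y, x)])
    let r := (List.range path.length).foldl (fun s j => pvAInner s (path.getD j (0, 0))) s0
    let (_, _, poly, poly1, poly2, poly3, polyy, polyy1, polyy2, polyy3) := r
    let temp := temp ++ [poly, poly1, poly2, poly3, polyy, polyy1, polyy2, polyy3]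
    -- a = path[0]; path.remove(a); path.append(a): removes the first element (first occurrence of path[0])
    let path := match path with
      | [] => []
      | a :: rest => rest ++ [a]
    (temp, path)) ([], path)
  st.1

-- ===== PORT B =====
def templateconst_alt (template : List (List (Int × Int))) : List (List (Int × Int)) :=
  let pts := (PySem.List.pyGet? template 0).getD []   -- template[0]
  let base := (pts.zip pts.tail).map (fun ab => (ab.2.1 - ab.1.1, ab.2.2 - ab.1.2))
  let n := base.length
  (List.range n).foldl (fun out i =>
    let rot := base.drop i ++ base.take i
    let r := rot.foldl (fun (s : (Int × Int) × List (Int × Int)) d =>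
      let x := s.1.1 + d.1
      let y := s.1.2 + d.2
      ((x, y), s.2 ++ [(x, y)])) ((0, 0), [((0 : Int), (0 : Int))])
    let points := r.2
    out ++ [points.map (fun p => (p.1, p.2)), points.map (fun p => (p.2, p.1)),
            points.map (fun p => (-p.1, p.2)), points.map (fun p => (p.2, -p.1)),
            points.map (fun p => (-p.1, -p.2)), points.map (fun p => (-p.2, -p.1)),
            points.map (fun p => (p.1, -p.2)), points.map (fun p => (-p.2, p.1))]) []

-- ===== PRECONDITION & SPEC =====
-- Python A evaluates template[0], which raises IndexError on the empty list.
def Pre_templateconst (template : List (List (Int × Int))) : Prop := template ≠ []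
instance (template : List (List (Int × Int))) : Decidable (Pre_templateconst template) := by unfold Pre_templateconst; infer_instance
def pvWitness_templateconst : (List (List (Int × Int))) := [[(0, 0), (1, 0), (1, 1)]]

def Spec_templateconst (template : List (List (Int × Int))) (out : List (List (Int × Int))) : Prop := out = templateconst_alt template
instance (template : List (List (Int × Int))) (out : List (List (Int × Int))) : Decidable (Spec_templateconst template out) := by unfold Spec_templateconst; infer_instance

-- ===== CLAIM (what is proved, stated in full; the proofs are below) =====
def Claim_equal_templateconst : Prop := ∀ (template : List (List (Int × Int))), Dom_templateconst template → Pre_templateconst template → Spec_templateconst template (templateconst template)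

-- ===== LEMMAS AND PROOFS =====

-- cumulative partial sums starting from (x, y)
def pvCum (x y : Int) : List (Int × Int) → List (Int × Int)
  | [] => []
  | d :: ds => (x + d.1, y + d.2) :: pvCum (x + d.1) (y + d.2) ds

-- a foldl over range(len l) that reads l.getD j is a foldl over l
theorem pv_foldl_range_getD {α β : Type} (l : List α) (f : β → α → β) (b : β) (d : α) :
    (List.range l.length).foldl (fun s j => f s (l.getD j d)) b = l.foldl f b := by
  induction l generalizing b with
  | nil => rfl
  | cons a t ih =>
    show (List.range (t.length + 1)).foldl _ b = _
    rw [List.range_succ_eq_map]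
    simp only [List.foldl_cons, List.foldl_map, List.getD_cons_zero, List.getD_cons_succ]
    exact ih (f b a)

-- A's path-building loop equals B's zip-with-tail differences
theorem pv_path_eq (t0 : List (Int × Int)) (acc : List (Int × Int)) :
    (List.range (t0.length - 1)).foldl (fun path i =>
        let p1 := t0.getD i (0, 0)
        let p2 := t0.getD (i + 1) (0, 0)
        path ++ [(p2.1 - p1.1, p2.2 - p1.2)]) acc
      = acc ++ (t0.zip t0.tail).map (fun ab => (ab.2.1 - ab.1.1, ab.2.2 - ab.1.2)) := by
  induction t0 generalizing acc with
  | nil => simp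
  | cons a t ih =>
    cases t with
    | nil => simp
    | cons b t' =>
      show (List.range (t'.length + 1)).foldl _ acc = _
      rw [List.range_succ_eq_map]
      simp only [List.foldl_cons, List.foldl_map, List.getD_cons_zero, List.getD_cons_succ]
      have := ih (acc ++ [(b.1 - a.1, b.2 - a.2)])
      simp only [List.length_cons, Nat.add_sub_cancel] at this
      simpa using this

-- characterisation of A's fused inner fold
theorem pv_innerA (l : List (Int × Int)) (x y : Int)
    (p0 p1 p2 p3 p4 p5 p6 p7 : List (Int × Int)) :
    l.foldl pvAInner (x, y, p0, p1, p2, p3, p4, p5, p6, p7)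
      = (x + (l.map Prod.fst).sum, y + (l.map Prod.snd).sum,
         p0 ++ (pvCum x y l).map (fun p => (p.1, p.2)),
         p1 ++ (pvCum x y l).map (fun p => (p.2, p.1)),
         p2 ++ (pvCum x y l).map (fun p => (-p.1, p.2)),
         p3 ++ (pvCum x y l).map (fun p => (p.2, -p.1)),
         p4 ++ (pvCum x y l).map (fun p => (-p.1, -p.2)),
         p5 ++ (pvCum x y l).map (fun p => (-p.2, -p.1)),
         p6 ++ (pvCum x y l).map (fun p => (p.1, -p.2)),
         p7 ++ (pvCum x y l).map (fun p => (-p.2, p.1))) := by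
  induction l generalizing x y p0 p1 p2 p3 p4 p5 p6 p7 with
  | nil => simp [pvCum]
  | cons d ds ih =>
    simp only [List.foldl_cons, pvAInner, pvCum, List.map_cons, List.sum_cons]
    rw [ih]
    simp [List.append_assoc, add_assoc]

-- characterisation of B's point-accumulating fold (only the list component is used)
theorem pv_innerB (l : List (Int × Int)) (x y : Int) (acc : List (Int × Int)) :
    (l.foldl (fun (s : (Int × Int) × List (Int × Int)) d =>
        ((s.1.1 + d.1, s.1.2 + d.2), s.2 ++ [(s.1.1 + d.1, s.1.2 + d.2)])) ((x, y), acc)).2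
      = acc ++ pvCum x y l := by
  induction l generalizing x y acc with
  | nil => simp [pvCum]
  | cons d ds ih =>
    simp only [List.foldl_cons, pvCum]
    rw [ih]
    simp

-- one rotation step on a drop/take rotation
theorem pv_rot_step (p : List (Int × Int)) (k : Nat) (hk : k < p.length) :
    (match p.drop k ++ p.take k with
      | [] => ([] : List (Int × Int))
      | a :: rest => rest ++ [a])
      = p.drop (k + 1) ++ p.take (k + 1) := by
  have hdrop : p.drop k = p[k] :: p.drop (k + 1) := List.drop_eq_getElem_cons hk
  rw [hdrop]
  show (p.drop (k + 1) ++ p.take k) ++ [p[k]] = _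
  rw [List.take_add_one, List.getElem?_eq_getElem hk]
  simp [List.append_assoc]

-- the paired outer folds agree
theorem pv_outer (p : List (Int × Int)) (m k : Nat) (hmk : k + m ≤ p.length) (temp : List (List (Int × Int))) :
    ((List.range' k m).foldl (fun (st : List (List (Int × Int)) × List (Int × Int)) _ =>
        let (temp, path) := st
        let x : Int := 0
        let y : Int := 0
        let s0 : pvAState :=
          (x, y, [(x, y)], [(y, x)], [(-x, y)], [(y, -x)], [(-x, -y)], [(-y, -x)], [(x, -y)], [(-y, x)])
        let r := (List.range path.length).foldl (fun s j => pvAInner s (path.getD j (0, 0))) s0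
        let (_, _, poly, poly1, poly2, poly3, polyy, polyy1, polyy2, polyy3) := r
        let temp := temp ++ [poly, poly1, poly2, poly3, polyy, polyy1, polyy2, polyy3]
        let path := match path with
          | [] => []
          | a :: rest => rest ++ [a]
        (temp, path)) (temp, p.drop k ++ p.take k)).1
      = (List.range' k m).foldl (fun out i =>
          let rot := p.drop i ++ p.take i
          let r := rot.foldl (fun (s : (Int × Int) × List (Int × Int)) d =>
            let x := s.1.1 + d.1
            let y := s.1.2 + d.2
            ((x, y), s.2 ++ [(x, y)])) ((0, 0), [((0 : Int), (0 : Int))])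
          let points := r.2
          out ++ [points.map (fun p => (p.1, p.2)), points.map (fun p => (p.2, p.1)),
                  points.map (fun p => (-p.1, p.2)), points.map (fun p => (p.2, -p.1)),
                  points.map (fun p => (-p.1, -p.2)), points.map (fun p => (-p.2, -p.1)),
                  points.map (fun p => (p.1, -p.2)), points.map (fun p => (-p.2, p.1))]) temp := by
  induction m generalizing k temp with
  | zero => rfl
  | succ m ih =>
    have hk : k < p.length := by omega
    rw [List.range'_succ]
    simp only [List.foldl_cons]
    rw [pv_foldl_range_getD, pv_innerA, pv_innerB, pv_rot_step p k hk]
    rw [ih (k + 1) (by omega)]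
    congr 1

-- ===== VERDICT (by name: the statement is the Claim_ definition above) =====
theorem templateconst_spec : Claim_equal_templateconst := by
  intro template _ _
  show templateconst template = templateconst_alt template
  unfold templateconst templateconst_alt
  simp only
  rw [pv_path_eq]
  simp only [List.nil_append]
  set base := (((PySem.List.pyGet? template 0).getD []).zip
      ((PySem.List.pyGet? template 0).getD []).tail).map
      (fun ab => (ab.2.1 - ab.1.1, ab.2.2 - ab.1.2)) with hbase
  rw [List.range_eq_range']
  have h := pv_outer base base.length 0 (by omega) []
  simpa using h
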